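-- pv_equiv track=rewrite | github.com/GSA-TTS/violentutf-api | tools/pre_audit/remediation_planner.py | _are_violations_related
-- ===== SOURCE A (Python) =====
-- from typing import Any, Dict, List, Optional
--
-- def _are_violations_related(v1: Dict[str, Any], v2: Dict[str, Any]) -> bool:
--     """Determine if two violations are related and can be fixed together."""
--     # Same ADR
--     if v1.get("adr_id") == v2.get("adr_id"):
--         return True
--
--     # Same file
--     if v1.get("file_path") == v2.get("file_path"):
--         return True
--
--     # Similar violation types (basic heuristic)
--     desc1 = v1.get("description", "").lower()
--     desc2 = v2.get("description", "").lower()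
--
--     # Common architectural issues that often go together
--     related_patterns = [
--         ["dependency", "injection", "coupling"],
--         ["layer", "layering", "architecture"],
--         ["security", "authentication", "authorization"],
--         ["logging", "audit", "monitoring"],
--     ]
--
--     for patterns in related_patterns:
--         if any(p in desc1 for p in patterns) and any(p in desc2 for p in patterns):
--             return True
--
--     return False
-- ===== SOURCE B (Python) =====
-- from typing import Any, Dict
--
-- # Flat keyword index: each keyword mapped to the bit of its pattern group.
-- WORD_BITS = [
--     ("dependency", 1), ("injection", 1), ("coupling", 1),
--     ("layer", 2), ("layering", 2), ("architecture", 2),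
--     ("security", 4), ("authentication", 4), ("authorization", 4),
--     ("logging", 8), ("audit", 8), ("monitoring", 8),
-- ]
--
--
-- def _are_violations_related(v1: Dict[str, Any], v2: Dict[str, Any]) -> bool:
--     if v1.get("adr_id") == v2.get("adr_id"):
--         return True
--     if v1.get("file_path") == v2.get("file_path"):
--         return True
--     desc1 = v1.get("description", "").lower()
--     desc2 = v2.get("description", "").lower()
--     m1 = 0
--     m2 = 0
--     for word, bit in WORD_BITS:
--         if word in desc1:
--             m1 |= bit
--         if word in desc2:
--             m2 |= bit
--     return m1 & m2 != 0
-- ===== Notes on version B (the rewrite author's own statement) =====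
-- stated objective: alternative
-- what changed: Replaces A's nested per-group loop with short-circuit (any over words, and of two anys, return True inside the loop) by a single pass over a flat keyword-to-group-bit index that accumulates one integer bitmask per description and decides relatedness with one bitwise AND at the end.
import Mathlib
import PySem

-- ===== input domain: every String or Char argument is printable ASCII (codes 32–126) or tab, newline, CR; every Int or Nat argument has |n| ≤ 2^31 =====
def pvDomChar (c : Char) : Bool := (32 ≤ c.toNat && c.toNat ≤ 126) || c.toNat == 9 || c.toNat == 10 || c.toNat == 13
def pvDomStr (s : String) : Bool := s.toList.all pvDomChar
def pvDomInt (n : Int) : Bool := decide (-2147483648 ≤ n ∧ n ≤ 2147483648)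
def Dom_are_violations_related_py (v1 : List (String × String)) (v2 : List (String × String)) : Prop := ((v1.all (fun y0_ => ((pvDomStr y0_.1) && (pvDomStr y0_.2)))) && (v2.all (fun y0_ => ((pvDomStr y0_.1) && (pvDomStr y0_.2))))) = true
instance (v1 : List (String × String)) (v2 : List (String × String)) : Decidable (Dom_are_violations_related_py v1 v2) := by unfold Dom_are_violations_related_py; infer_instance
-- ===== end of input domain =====

-- B replaces A's nested per-group short-circuiting loop by one flat pass over a
-- keyword->group-bit index accumulating two integer bitmasks, tested with one bitwise AND.

-- ===== PORT A =====
def relatedPatternsA : List (List String) :=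
  [["dependency", "injection", "coupling"],
   ["layer", "layering", "architecture"],
   ["security", "authentication", "authorization"],
   ["logging", "audit", "monitoring"]]

def are_violations_related_py (v1 : List (String × String)) (v2 : List (String × String)) : Bool :=
  if (PySem.Dict.get? (PySem.Dict.mk v1) "adr_id") == (PySem.Dict.get? (PySem.Dict.mk v2) "adr_id") then true
  else if (PySem.Dict.get? (PySem.Dict.mk v1) "file_path") == (PySem.Dict.get? (PySem.Dict.mk v2) "file_path") then true
  else
    let desc1 := PySem.Str.lower (PySem.Dict.getD (PySem.Dict.mk v1) "description" "")
    let desc2 := PySem.Str.lower (PySem.Dict.getD (PySem.Dict.mk v2) "description" "")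
    -- for patterns in related_patterns: if any(p in desc1 …) and any(p in desc2 …): return True; return False
    relatedPatternsA.any (fun ps =>
      ps.any (fun p => PySem.Str.isIn p desc1) && ps.any (fun p => PySem.Str.isIn p desc2))

-- ===== PORT B =====
def WORD_BITS : List (String × Nat) :=
  [("dependency", 1), ("injection", 1), ("coupling", 1),
   ("layer", 2), ("layering", 2), ("architecture", 2),
   ("security", 4), ("authentication", 4), ("authorization", 4),
   ("logging", 8), ("audit", 8), ("monitoring", 8)]

def are_violations_related_py_alt (v1 : List (String × String)) (v2 : List (String × String)) : Bool :=
  if (PySem.Dict.get? (PySem.Dict.mk v1) "adr_id") == (PySem.Dict.get? (PySem.Dict.mk v2) "adr_id") then true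
  else if (PySem.Dict.get? (PySem.Dict.mk v1) "file_path") == (PySem.Dict.get? (PySem.Dict.mk v2) "file_path") then true
  else
    let desc1 := PySem.Str.lower (PySem.Dict.getD (PySem.Dict.mk v1) "description" "")
    let desc2 := PySem.Str.lower (PySem.Dict.getD (PySem.Dict.mk v2) "description" "")
    -- m1 = m2 = 0; for word, bit in WORD_BITS: if word in desc1: m1 |= bit; if word in desc2: m2 |= bit
    let ms := WORD_BITS.foldl (fun (m : Nat × Nat) wb =>
      (if PySem.Str.isIn wb.1 desc1 then m.1 ||| wb.2 else m.1,
       if PySem.Str.isIn wb.1 desc2 then m.2 ||| wb.2 else m.2)) (0, 0)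
    (ms.1 &&& ms.2) != 0

-- ===== PRECONDITION & SPEC =====
def Spec_are_violations_related_py (v1 : List (String × String)) (v2 : List (String × String)) (out : Bool) : Prop := out = are_violations_related_py_alt v1 v2
instance (v1 : List (String × String)) (v2 : List (String × String)) (out : Bool) : Decidable (Spec_are_violations_related_py v1 v2 out) := by unfold Spec_are_violations_related_py; infer_instance

-- ===== CLAIM (what is proved, stated in full; the proofs are below) =====
def Claim_equal_are_violations_related_py : Prop := ∀ (v1 : List (String × String)) (v2 : List (String × String)), Dom_are_violations_related_py v1 v2 → Spec_are_violations_related_py v1 v2 (are_violations_related_py v1 v2)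

-- ===== LEMMAS AND PROOFS =====

-- push the conditional OR-accumulation into an independent contribution
lemma or_push (m k : Nat) (b : Bool) :
    (if b = true then m ||| k else m) = m ||| (if b = true then k else 0) := by
  cases b <;> simp

-- merge two contributions of the same bit
lemma if_or_merge2 (a b : Bool) (k : Nat) :
    (if a = true then k else 0) ||| (if b = true then k else 0)
      = (if (a || b) = true then k else 0) := by
  cases a <;> cases b <;> simp

-- the mask fold, characterised as one conditional bit per pattern group
lemma mask_fold_eq (d1 d2 : String) :
    WORD_BITS.foldl (fun (m : Nat × Nat) wb =>
      (if PySem.Str.isIn wb.1 d1 then m.1 ||| wb.2 else m.1,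
       if PySem.Str.isIn wb.1 d2 then m.2 ||| wb.2 else m.2)) (0, 0)
    = (((if PySem.Str.isIn "dependency" d1 || (PySem.Str.isIn "injection" d1 || PySem.Str.isIn "coupling" d1) then 1 else 0) |||
        (if PySem.Str.isIn "layer" d1 || (PySem.Str.isIn "layering" d1 || PySem.Str.isIn "architecture" d1) then 2 else 0) |||
        (if PySem.Str.isIn "security" d1 || (PySem.Str.isIn "authentication" d1 || PySem.Str.isIn "authorization" d1) then 4 else 0) |||
        (if PySem.Str.isIn "logging" d1 || (PySem.Str.isIn "audit" d1 || PySem.Str.isIn "monitoring" d1) then 8 else 0)),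
       ((if PySem.Str.isIn "dependency" d2 || (PySem.Str.isIn "injection" d2 || PySem.Str.isIn "coupling" d2) then 1 else 0) |||
        (if PySem.Str.isIn "layer" d2 || (PySem.Str.isIn "layering" d2 || PySem.Str.isIn "architecture" d2) then 2 else 0) |||
        (if PySem.Str.isIn "security" d2 || (PySem.Str.isIn "authentication" d2 || PySem.Str.isIn "authorization" d2) then 4 else 0) |||
        (if PySem.Str.isIn "logging" d2 || (PySem.Str.isIn "audit" d2 || PySem.Str.isIn "monitoring" d2) then 8 else 0))) := by
  simp only [WORD_BITS, List.foldl, or_push, Nat.zero_or, Nat.lor_assoc, if_or_merge2, Bool.or_assoc]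

-- bitmask intersection of two 4-bit group masks equals the groupwise tests
lemma land_group_masks (G0 G1 G2 G3 H0 H1 H2 H3 : Bool) :
    ((((if G0 = true then 1 else 0) ||| (if G1 = true then 2 else 0) |||
       (if G2 = true then 4 else 0) ||| (if G3 = true then 8 else 0) : Nat) &&&
      ((if H0 = true then 1 else 0) ||| (if H1 = true then 2 else 0) |||
       (if H2 = true then 4 else 0) ||| (if H3 = true then 8 else 0))) != 0)
    = (G0 && H0 || (G1 && H1 || (G2 && H2 || G3 && H3))) := by
  revert G0 G1 G2 G3 H0 H1 H2 H3; decide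

-- ===== VERDICT (by name: the statement is the Claim_ definition above) =====
theorem are_violations_related_py_spec : Claim_equal_are_violations_related_py := by
  intro v1 v2 _
  unfold Spec_are_violations_related_py are_violations_related_py are_violations_related_py_alt
  split_ifs with h1 h2
  · rfl
  · rfl
  · dsimp only
    rw [mask_fold_eq]
    simp only [relatedPatternsA, List.any_cons, List.any_nil, Bool.or_false]
    rw [land_group_masks]
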